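-- pv_equiv track=rewrite | github.com/Monikahtp/Kripto | tugas1.py | xor_encrypt_ecb
-- ===== SOURCE A (Python) =====
-- def shift_left(bits, n):
--     # Geser bit ke kiri, dengan wrapping untuk bit yang keluar
--     return ((bits << n) & 0xF) | ((bits >> (4 - n)) & 0xF)
--
-- def xor_encrypt_ecb(plaintext, key):
--     ciphertext = ""
--     # Bagi plaintext menjadi blok-blok 4-bit
--     for i in range(0, len(plaintext), 4):
--         block = plaintext[i:i+4]
--         if len(block) < 4:
--             block = block.ljust(4, '0')  # Isi dengan 0 jika panjangnya kurang dari 4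
--
--         # Konversi blok ke bilangan bulat
--         block_int = int(block, 2)
--         # XOR dengan kunci
--         encrypted_block = block_int ^ key
--         # Geser 1 bit ke kiri
--         encrypted_block = shift_left(encrypted_block, 1)
--         # Konversi kembali ke string biner dan tambahkan ke ciphertext
--         ciphertext += format(encrypted_block, '04b')
--     return ciphertext
-- ===== SOURCE B (Python) =====
-- def xor_encrypt_ecb(plaintext, key):
--     # Precompute a 16-entry substitution table keyed by the 4-bit block STRING:
--     # table['vvvv'] = format(rotate-left-by-1 of (v ^ key), '04b') (the >>3 term
--     # also folds bits 4-6 of the key into the result, exactly as the arithmetic does).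
--     table = {}
--     for v in range(16):
--         e = v ^ key
--         table[format(v, '04b')] = format(((e << 1) & 0xF) | ((e >> 3) & 0xF), '04b')
--     # Pad once up front to a multiple of 4, then translate block by block.
--     padded = plaintext + '0' * (-len(plaintext) % 4)
--     return ''.join(table[padded[i:i+4]] for i in range(0, len(padded), 4))
-- ===== Notes on version B (the rewrite author's own statement) =====
-- stated objective: alternative
-- what changed: B precomputes a 16-entry substitution table mapping each 4-bit block string directly to its encrypted block string, pads the plaintext once up front, and translates by pure table lookup with join, eliminating the per-block int parsing, XOR and shift arithmetic of A's accumulator loop.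
-- outside the precondition, e.g. on xor_encrypt_ecb(' 11 ', 3): A returns '0000', B raises KeyError; on xor_encrypt_ecb('1_01', 5): A returns '0000', B raises KeyError
import Mathlib
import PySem

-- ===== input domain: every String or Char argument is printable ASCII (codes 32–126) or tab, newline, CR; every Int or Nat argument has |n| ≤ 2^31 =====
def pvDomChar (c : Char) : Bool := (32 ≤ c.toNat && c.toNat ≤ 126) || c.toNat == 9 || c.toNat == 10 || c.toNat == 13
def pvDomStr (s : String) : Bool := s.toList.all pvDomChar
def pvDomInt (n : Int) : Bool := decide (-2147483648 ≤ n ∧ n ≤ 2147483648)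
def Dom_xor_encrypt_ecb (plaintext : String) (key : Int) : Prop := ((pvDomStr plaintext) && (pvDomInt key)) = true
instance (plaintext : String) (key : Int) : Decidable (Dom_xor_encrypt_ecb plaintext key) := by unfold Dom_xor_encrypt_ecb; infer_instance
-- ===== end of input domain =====

-- B replaces A's per-block parse/XOR/shift arithmetic by a precomputed 16-entry
-- block-string substitution table plus one up-front padding pass (alternative, same cost).


-- ===== PORT A =====
-- shift_left(bits, n) = ((bits << n) & 0xF) | ((bits >> (4 - n)) & 0xF)
def pvShiftLeftA (bits : Int) (n : Nat) : Int :=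
  PySem.Int.bor (PySem.Int.band (bits <<< n) 15) (PySem.Int.band (bits >>> (4 - n)) 15)

-- one iteration of A's loop; accumulator none = the ValueError raised by int(block, 2)
-- (excluded by Pre_); format(x, '04b') is zfill of format(x, 'b') to width 4
def pvStepA (key : Int) (cs : List Char) (acc : Option (List Char)) (i : Int) : Option (List Char) :=
  match acc with
  | none => none
  | some ct =>
    let block := PySem.List.slice cs (some i) (some (i + 4))
    let block := if block.length < 4 then block ++ List.replicate (4 - block.length) '0' else block
    match PySem.Int.ofCharsBase? block 2 with
    | none => none
    | some blockInt =>
      some (ct ++ PySem.Chars.zfill (PySem.Int.toBinChars (pvShiftLeftA (PySem.Int.bxor blockInt key) 1)) 4)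

def xor_encrypt_ecb (plaintext : String) (key : Int) : String :=
  let cs := plaintext.toList
  let r := (PySem.List.pyRange 0 (cs.length : Int) 4).foldl (pvStepA key cs) (some [])
  String.ofList (r.getD [])   -- none only where the Python raises ValueError (outside Pre_)

-- ===== PORT B =====
-- table[format(v, '04b')] = format(((e << 1) & 0xF) | ((e >> 3) & 0xF), '04b'), e = v ^ key
def pvTableB (key : Int) : PySem.Dict (List Char) (List Char) :=
  (PySem.List.pyRange 0 16 1).foldl (fun d v =>
    let e := PySem.Int.bxor v key
    PySem.Dict.insert d (PySem.Chars.zfill (PySem.Int.toBinChars v) 4)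
      (PySem.Chars.zfill (PySem.Int.toBinChars
        (PySem.Int.bor (PySem.Int.band (e <<< (1:Nat)) 15) (PySem.Int.band (e >>> (3:Nat)) 15))) 4)) PySem.Dict.empty

def xor_encrypt_ecb_alt (plaintext : String) (key : Int) : String :=
  let cs := plaintext.toList
  let table := pvTableB key
  let padded := cs ++ List.replicate (PySem.Int.mod (-(cs.length : Int)) 4).toNat '0'
  String.ofList (PySem.Chars.join []
    ((PySem.List.pyRange 0 (padded.length : Int) 4).map
      (fun i => (PySem.Dict.get? table (PySem.List.slice padded (some i) (some (i + 4)))).getD [])))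
  -- get? = none is the Python KeyError on a non-binary block (outside Pre_)

-- ===== PRECONDITION & SPEC =====
-- Pre_ admits exactly the plaintexts made of '0'/'1' characters: on any other plaintext
-- A's int(block, 2) either raises ValueError or accepts the block only through Python's
-- int-literal leniency (spaces, '+'/'-' signs, underscores), an accident of parsing that
-- B's block-string table naturally does not reproduce (it raises KeyError there).
def Pre_xor_encrypt_ecb (plaintext : String) (key : Int) : Prop :=
  plaintext.toList.all (fun c => c == '0' || c == '1') = true
instance (plaintext : String) (key : Int) : Decidable (Pre_xor_encrypt_ecb plaintext key) := by
  unfold Pre_xor_encrypt_ecb; infer_instance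

def pvWitness_xor_encrypt_ecb : String × Int := ("1011010", 27)

def Spec_xor_encrypt_ecb (plaintext : String) (key : Int) (out : String) : Prop := out = xor_encrypt_ecb_alt plaintext key
instance (plaintext : String) (key : Int) (out : String) : Decidable (Spec_xor_encrypt_ecb plaintext key out) := by unfold Spec_xor_encrypt_ecb; infer_instance

-- ===== CLAIM (what is proved, stated in full; the proofs are below) =====
def Claim_equal_xor_encrypt_ecb : Prop := ∀ (plaintext : String) (key : Int), Dom_xor_encrypt_ecb plaintext key → Pre_xor_encrypt_ecb plaintext key → Spec_xor_encrypt_ecb plaintext key (xor_encrypt_ecb plaintext key)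

-- ===== LEMMAS AND PROOFS =====

lemma get?_foldl_insert_ne (K V : Int → List Char) (l : List Int)
    (d : PySem.Dict (List Char) (List Char)) (b : List Char) (h : ∀ w ∈ l, K w ≠ b) :
    (l.foldl (fun d w => PySem.Dict.insert d (K w) (V w)) d).get? b = d.get? b := by
  induction l generalizing d with
  | nil => rfl
  | cons w t ih =>
    simp only [List.foldl_cons]
    rw [ih _ (fun u hu => h u (List.mem_cons_of_mem _ hu))]
    exact PySem.Dict.get?_insert_of_ne d (V w) (Ne.symm (h w List.mem_cons_self))

lemma get?_foldl_insert (K V : Int → List Char) (l : List Int)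
    (d : PySem.Dict (List Char) (List Char)) (v : Int) (hv : v ∈ l)
    (hinj : ∀ w ∈ l, w ≠ v → K w ≠ K v) :
    (l.foldl (fun d w => PySem.Dict.insert d (K w) (V w)) d).get? (K v) = some (V v) := by
  induction l generalizing d with
  | nil => cases hv
  | cons w t ih =>
    simp only [List.foldl_cons]
    by_cases hvt : v ∈ t
    · exact ih _ hvt (fun u hu hne => hinj u (List.mem_cons_of_mem _ hu) hne)
    · have hwv : w = v := by
        rcases List.mem_cons.mp hv with h | h
        · exact h.symm
        · exact absurd h hvt
      subst hwv
      rw [get?_foldl_insert_ne K V t _ _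
        (fun u hu => hinj u (List.mem_cons_of_mem _ hu) (fun he => hvt (he ▸ hu)))]
      exact PySem.Dict.get?_insert_self d (K w) (V w)

lemma pyRange16 : PySem.List.pyRange 0 16 1 = [0,1,2,3,4,5,6,7,8,9,10,11,12,13,14,15] := by decide

lemma pvLookup (key v : Int) (hv : v ∈ ([0,1,2,3,4,5,6,7,8,9,10,11,12,13,14,15] : List Int)) :
    PySem.Dict.get? (pvTableB key) (PySem.Chars.zfill (PySem.Int.toBinChars v) 4) =
      some (PySem.Chars.zfill (PySem.Int.toBinChars (pvShiftLeftA (PySem.Int.bxor v key) 1)) 4) := by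
  fin_cases hv <;>
  · unfold pvTableB
    rw [pyRange16]
    refine get?_foldl_insert (fun w => PySem.Chars.zfill (PySem.Int.toBinChars w) 4)
      (fun w => PySem.Chars.zfill (PySem.Int.toBinChars (pvShiftLeftA (PySem.Int.bxor w key) 1)) 4)
      _ _ _ ?_ ?_ <;> decide

lemma pvParse (b : List Char) (hlen : b.length = 4) (hbin : ∀ c ∈ b, c = '0' ∨ c = '1') :
    PySem.Int.ofCharsBase? b 2 = some ((PySem.Int.ofCharsBase? b 2).getD 0) ∧
    (PySem.Int.ofCharsBase? b 2).getD 0 ∈ ([0,1,2,3,4,5,6,7,8,9,10,11,12,13,14,15] : List Int) ∧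
    b = PySem.Chars.zfill (PySem.Int.toBinChars ((PySem.Int.ofCharsBase? b 2).getD 0)) 4 := by
  rcases b with _ | ⟨c0, b⟩; · simp at hlen
  rcases b with _ | ⟨c1, b⟩; · simp at hlen
  rcases b with _ | ⟨c2, b⟩; · simp at hlen
  rcases b with _ | ⟨c3, b⟩; · simp at hlen
  have hb : b = [] := by
    simp only [List.length_cons] at hlen
    exact List.eq_nil_of_length_eq_zero (by omega)
  subst hb
  have h0 := hbin c0 (by simp)
  have h1 := hbin c1 (by simp)
  have h2 := hbin c2 (by simp)
  have h3 := hbin c3 (by simp)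
  rcases h0 with rfl | rfl <;> rcases h1 with rfl | rfl <;> rcases h2 with rfl | rfl <;>
    rcases h3 with rfl | rfl <;> decide

lemma pvChunk_eq (key : Int) (b : List Char) (hlen : b.length = 4)
    (hbin : ∀ c ∈ b, c = '0' ∨ c = '1') :
    ∃ v : Int, PySem.Int.ofCharsBase? b 2 = some v ∧
      PySem.Dict.get? (pvTableB key) b =
        some (PySem.Chars.zfill (PySem.Int.toBinChars (pvShiftLeftA (PySem.Int.bxor v key) 1)) 4) := by
  obtain ⟨hp, hmem, hKb⟩ := pvParse b hlen hbin
  have hl := pvLookup key _ hmem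
  rw [← hKb] at hl
  exact ⟨_, hp, hl⟩


lemma pvJoin_empty (ps : List (List Char)) : PySem.Chars.join [] ps = ps.flatten := by
  induction ps with
  | nil => rfl
  | cons a t ih =>
    cases t with
    | nil => simp [PySem.Chars.join, List.intercalate]
    | cons b u =>
      simp [PySem.Chars.join, List.intercalate, List.intersperse] at ih ⊢
      exact ih

lemma pvFoldA (key : Int) (cs : List Char) (l : List Int) (g : Int → List Char)
    (h : ∀ i ∈ l, ∀ ct, pvStepA key cs (some ct) i = some (ct ++ g i)) (a : List Char) :
    l.foldl (pvStepA key cs) (some a) = some (a ++ (l.map g).flatten) := by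
  induction l generalizing a with
  | nil => simp
  | cons i t ih =>
    simp only [List.foldl_cons, List.map_cons, List.flatten_cons]
    rw [h i (by simp) a, ih (fun j hj => h j (by simp [hj])) (a ++ g i)]
    simp

lemma pvPad_add (n : Nat) : n + (PySem.Int.mod (-(n:Int)) 4).toNat = 4 * ((n+3)/4) := by
  have h := PySem.Int.mod_eq_emod_of_pos (a := -(n:Int)) (b := 4) (by norm_num)
  rw [h]
  omega

lemma pvRange4 (N : Nat) : PySem.List.pyRange 0 (N:Int) 4 =
    (List.range ((N+3)/4)).map (fun k => ((4*k : Nat) : Int)) := by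
  rw [PySem.List.pyRange_of_pos 0 N (by norm_num)]
  by_cases h : (0:Int) < (N:Int)
  · rw [if_pos h]
    have he : (((N:Int) - 0 + 4 - 1) / 4).toNat = (N+3)/4 := by omega
    rw [he]
    exact List.map_congr_left (fun k _ => by push_cast; ring)
  · rw [if_neg h]
    have hN : N = 0 := by omega
    subst hN
    simp

lemma pvSlice4 {α : Type} (xs : List α) (k : Nat) :
    PySem.List.slice xs (some ((4*k : Nat) : Int)) (some (((4*k : Nat) : Int) + 4)) =
      (xs.drop (4*k)).take 4 := by
  have := PySem.List.slice_natCast_add xs (4*k) 4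
  simpa using this

lemma pvBlockA_eq (cs : List Char) (k m : Nat) (hm : cs.length + (PySem.Int.mod (-(cs.length:Int)) 4).toNat = 4 * m)
    (hk : 4*k < cs.length) :
    (if ((cs.drop (4*k)).take 4).length < 4
      then (cs.drop (4*k)).take 4 ++ List.replicate (4 - ((cs.drop (4*k)).take 4).length) '0'
      else (cs.drop (4*k)).take 4)
    = ((cs ++ List.replicate (PySem.Int.mod (-(cs.length:Int)) 4).toNat '0').drop (4*k)).take 4 := by
  set n := cs.length with hn
  set P := (PySem.Int.mod (-(n:Int)) 4).toNat with hP
  have hdrop : (cs ++ List.replicate P '0').drop (4*k) = cs.drop (4*k) ++ List.replicate P '0' := by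
    rw [List.drop_append]
    have : 4*k - cs.length = 0 := by omega
    rw [this]
    simp
  rw [hdrop, List.take_append, List.take_replicate]
  have hlen : (cs.drop (4*k)).length = n - 4*k := by simp [hn]
  by_cases h4 : 4 ≤ n - 4*k
  · have h1 : ((cs.drop (4*k)).take 4).length = 4 := by simp [hlen]; omega
    rw [if_neg (by omega)]
    have h0 : min (4 - (cs.drop (4*k)).length) P = 0 := by omega
    rw [h0]
    simp
  · have hL : ((cs.drop (4*k)).take 4).length = n - 4*k := by simp [hlen]; omega
    have ht : (cs.drop (4*k)).take 4 = cs.drop (4*k) := List.take_of_length_le (by omega)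
    rw [if_pos (by omega), hL, ht]
    have h0 : min (4 - (cs.drop (4*k)).length) P = 4 - (n - 4*k) := by omega
    rw [h0]


-- ===== VERDICT (by name: the statement is the Claim_ definition above) =====
theorem xor_encrypt_ecb_spec : Claim_equal_xor_encrypt_ecb := by
  intro plaintext key _hdom hpre
  unfold Spec_xor_encrypt_ecb
  unfold Pre_xor_encrypt_ecb at hpre
  unfold xor_encrypt_ecb xor_encrypt_ecb_alt
  refine congrArg String.ofList ?_
  show ((PySem.List.pyRange 0 (plaintext.toList.length : Int) 4).foldl
      (pvStepA key plaintext.toList) (some [])).getD []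
    = PySem.Chars.join []
      ((PySem.List.pyRange 0 (((plaintext.toList ++ List.replicate (PySem.Int.mod (-(plaintext.toList.length : Int)) 4).toNat '0').length : Int)) 4).map
        (fun i => (PySem.Dict.get? (pvTableB key)
          (PySem.List.slice (plaintext.toList ++ List.replicate (PySem.Int.mod (-(plaintext.toList.length : Int)) 4).toNat '0') (some i) (some (i + 4)))).getD []))
  set cs := plaintext.toList with hcs
  have hbin : ∀ c ∈ cs, c = '0' ∨ c = '1' := by
    intro c hc
    have := List.all_eq_true.mp hpre c hc
    simpa using this
  set n := cs.length with hn
  set P := (PySem.Int.mod (-(n:Int)) 4).toNat with hPdef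
  set m := (n+3)/4 with hmdef
  have hm : n + P = 4 * m := pvPad_add n
  set padded := cs ++ List.replicate P '0' with hpadded
  have hplen : padded.length = n + P := by simp [hpadded, ← hn]
  set g : Int → List Char := fun i =>
    (PySem.Dict.get? (pvTableB key) (PySem.List.slice padded (some i) (some (i + 4)))).getD [] with hg
  have hblk : ∀ k, k < m → 4*k < n ∧ ((padded.drop (4*k)).take 4).length = 4 ∧
      (∀ c ∈ (padded.drop (4*k)).take 4, c = '0' ∨ c = '1') := by
    intro k hkm
    have hk4 : 4*k < n := by omega
    refine ⟨hk4, ?_, ?_⟩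
    · simp [hplen]; omega
    · intro c hc
      have hc' : c ∈ padded := List.mem_of_mem_drop (List.mem_of_mem_take hc)
      rcases List.mem_append.mp hc' with h | h
      · exact hbin c h
      · exact Or.inl (List.eq_of_mem_replicate h)
  have hstep : ∀ i ∈ (List.range m).map (fun k => ((4*k : Nat) : Int)), ∀ ct,
      pvStepA key cs (some ct) i = some (ct ++ g i) := by
    intro i hi ct
    obtain ⟨k, hk, rfl⟩ := List.mem_map.mp hi
    have hkm : k < m := List.mem_range.mp hk
    obtain ⟨hk4, hlen4, hbin4⟩ := hblk k hkm
    obtain ⟨v, hp, hlook⟩ := pvChunk_eq key ((padded.drop (4*k)).take 4) hlen4 hbin4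
    simp only [pvStepA, pvSlice4]
    rw [pvBlockA_eq cs k m hm hk4]
    rw [← hpadded, hp]
    simp only [hg, pvSlice4, hlook, Option.getD_some]
  rw [hplen, show n + P = 4*m from hm]
  rw [pvRange4 n, pvRange4 (4*m)]
  rw [show (4*m+3)/4 = m from by omega, show (n+3)/4 = m from hmdef.symm]
  rw [pvJoin_empty]
  rw [pvFoldA key cs _ g hstep []]
  simp
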